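-- pv_equiv track=rewrite | github.com/karenvo/xora | xora/inference_engine.py | _get_zodiac
-- ===== SOURCE A (Python) =====
-- _ZODIAC_TABLE = [
--     ((3, 21), (4, 19), "Aries", "fire", "ram"),
--     ((4, 20), (5, 20), "Taurus", "earth", "bull"),
--     ((5, 21), (6, 20), "Gemini", "air", "twins"),
--     ((6, 21), (7, 22), "Cancer", "water", "crab"),
--     ((7, 23), (8, 22), "Leo", "fire", "lion"),
--     ((8, 23), (9, 22), "Virgo", "earth", "maiden"),
--     ((9, 23), (10, 22), "Libra", "air", "scales"),
--     ((10, 23), (11, 21), "Scorpio", "water", "scorpion"),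
--     ((11, 22), (12, 21), "Sagittarius", "fire", "archer"),
--     ((12, 22), (1, 19), "Capricorn", "earth", "goat"),
--     ((1, 20), (2, 18), "Aquarius", "air", "waterbearer"),
--     ((2, 19), (3, 20), "Pisces", "water", "fish"),
-- ]
--
-- def _get_zodiac(month: int, day: int) -> tuple[str, str, str] | None:
--     """Return (sign, element, symbol) for a given month/day."""
--     for start, end, sign, element, symbol in _ZODIAC_TABLE:
--         if sign == "Capricorn":
--             if (month == 12 and day >= 22) or (month == 1 and day <= 19):
--                 return sign, element, symbol
--         elif (month == start[0] and day >= start[1]) or \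
--              (month == end[0] and day <= end[1]):
--             return sign, element, symbol
--     return None
-- ===== SOURCE B (Python) =====
-- _CUTOFF = [20, 19, 21, 20, 21, 21, 23, 23, 23, 23, 22, 22]
-- _SIGNS = [
--     ("Capricorn", "earth", "goat"),
--     ("Aquarius", "air", "waterbearer"),
--     ("Pisces", "water", "fish"),
--     ("Aries", "fire", "ram"),
--     ("Taurus", "earth", "bull"),
--     ("Gemini", "air", "twins"),
--     ("Cancer", "water", "crab"),
--     ("Leo", "fire", "lion"),
--     ("Virgo", "earth", "maiden"),
--     ("Libra", "air", "scales"),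
--     ("Scorpio", "water", "scorpion"),
--     ("Sagittarius", "fire", "archer"),
-- ]
--
-- def _get_zodiac(month: int, day: int):
--     """Return (sign, element, symbol) for a given month/day."""
--     if not (1 <= month <= 12):
--         return None
--     if day < _CUTOFF[month - 1]:
--         return _SIGNS[month - 1]
--     return _SIGNS[month % 12]
-- ===== Notes on version B (the rewrite author's own statement) =====
-- stated objective: idiomatic
-- what changed: Replaces the linear scan over the 12 zodiac date-range rows (with a special Capricorn branch) by a direct per-month table lookup: a 12-entry cutoff-day array and a 12-entry sign array, one threshold comparison decides between sign[month-1] and sign[month%12].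
import Mathlib
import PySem

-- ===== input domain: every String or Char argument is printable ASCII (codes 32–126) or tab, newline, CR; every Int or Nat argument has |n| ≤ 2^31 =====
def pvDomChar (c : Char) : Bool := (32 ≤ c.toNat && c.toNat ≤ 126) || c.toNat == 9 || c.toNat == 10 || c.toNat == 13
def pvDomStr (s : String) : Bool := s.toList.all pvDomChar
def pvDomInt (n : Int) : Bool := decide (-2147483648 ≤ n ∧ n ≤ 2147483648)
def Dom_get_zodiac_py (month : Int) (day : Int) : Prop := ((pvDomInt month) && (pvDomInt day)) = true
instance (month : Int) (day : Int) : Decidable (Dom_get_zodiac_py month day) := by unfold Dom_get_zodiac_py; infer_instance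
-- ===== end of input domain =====

-- B replaces A's linear scan over the 12 date-range rows by a per-month cutoff table and direct indexing (idiomatic).
-- ===== PORT A =====
def zodiacTable : List ((Int × Int) × (Int × Int) × String × String × String) :=
  [ ((3, 21), (4, 19), "Aries", "fire", "ram"),
    ((4, 20), (5, 20), "Taurus", "earth", "bull"),
    ((5, 21), (6, 20), "Gemini", "air", "twins"),
    ((6, 21), (7, 22), "Cancer", "water", "crab"),
    ((7, 23), (8, 22), "Leo", "fire", "lion"),
    ((8, 23), (9, 22), "Virgo", "earth", "maiden"),
    ((9, 23), (10, 22), "Libra", "air", "scales"),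
    ((10, 23), (11, 21), "Scorpio", "water", "scorpion"),
    ((11, 22), (12, 21), "Sagittarius", "fire", "archer"),
    ((12, 22), (1, 19), "Capricorn", "earth", "goat"),
    ((1, 20), (2, 18), "Aquarius", "air", "waterbearer"),
    ((2, 19), (3, 20), "Pisces", "water", "fish") ]

-- the `for` loop over _ZODIAC_TABLE, row by row
def zodiacScan (month : Int) (day : Int) :
    List ((Int × Int) × (Int × Int) × String × String × String) →
    Option (String × String × String)
  | [] => none
  | (s, e, sign, element, symbol) :: rest =>
    if sign = "Capricorn" then
      if (month = 12 ∧ day ≥ 22) ∨ (month = 1 ∧ day ≤ 19) then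
        some (sign, element, symbol)
      else zodiacScan month day rest
    else if (month = s.1 ∧ day ≥ s.2) ∨ (month = e.1 ∧ day ≤ e.2) then
      some (sign, element, symbol)
    else zodiacScan month day rest

def get_zodiac_py (month : Int) (day : Int) : Option (String × String × String) :=
  zodiacScan month day zodiacTable

-- ===== PORT B =====
def zodiacCutoff : List Int := [20, 19, 21, 20, 21, 21, 23, 23, 23, 23, 22, 22]

def zodiacSigns : List (String × String × String) :=
  [ ("Capricorn", "earth", "goat"),
    ("Aquarius", "air", "waterbearer"),
    ("Pisces", "water", "fish"),
    ("Aries", "fire", "ram"),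
    ("Taurus", "earth", "bull"),
    ("Gemini", "air", "twins"),
    ("Cancer", "water", "crab"),
    ("Leo", "fire", "lion"),
    ("Virgo", "earth", "maiden"),
    ("Libra", "air", "scales"),
    ("Scorpio", "water", "scorpion"),
    ("Sagittarius", "fire", "archer") ]

def get_zodiac_py_alt (month : Int) (day : Int) : Option (String × String × String) :=
  if 1 ≤ month ∧ month ≤ 12 then
    -- under the guard both indices are in range, so pyGet? is `some _` (Python never raises here)
    if day < (PySem.List.pyGet? zodiacCutoff (month - 1)).getD 0 then
      PySem.List.pyGet? zodiacSigns (month - 1)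
    else
      PySem.List.pyGet? zodiacSigns (PySem.Int.mod month 12)
  else none

-- ===== PRECONDITION & SPEC =====
def Spec_get_zodiac_py (month : Int) (day : Int) (out : Option (String × String × String)) : Prop := out = get_zodiac_py_alt month day
instance (month : Int) (day : Int) (out : Option (String × String × String)) : Decidable (Spec_get_zodiac_py month day out) := by unfold Spec_get_zodiac_py; infer_instance

-- ===== CLAIM (what is proved, stated in full; the proofs are below) =====
def Claim_equal_get_zodiac_py : Prop := ∀ (month : Int) (day : Int), Dom_get_zodiac_py month day → Spec_get_zodiac_py month day (get_zodiac_py month day)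

-- ===== LEMMAS AND PROOFS =====

-- ===== VERDICT (by name: the statement is the Claim_ definition above) =====
set_option maxHeartbeats 4000000 in
theorem get_zodiac_py_spec : Claim_equal_get_zodiac_py := by
  intro month day _
  unfold Spec_get_zodiac_py
  by_cases hm : 1 ≤ month ∧ month ≤ 12
  · obtain ⟨h1, h2⟩ := hm
    interval_cases month <;>
      simp [get_zodiac_py, zodiacScan, zodiacTable, get_zodiac_py_alt, zodiacCutoff,
        zodiacSigns, PySem.List.pyGet?, PySem.List.pyIdx?, PySem.Int.mod] <;>
      first
        | rfl
        | omega
        | (split_ifs <;> first | rfl | omega)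
  · rw [get_zodiac_py_alt, if_neg hm]
    show zodiacScan month day zodiacTable = none
    rw [zodiacTable]
    rw [zodiacScan]; rw [if_neg (by decide), if_neg (by omega)]
    rw [zodiacScan]; rw [if_neg (by decide), if_neg (by omega)]
    rw [zodiacScan]; rw [if_neg (by decide), if_neg (by omega)]
    rw [zodiacScan]; rw [if_neg (by decide), if_neg (by omega)]
    rw [zodiacScan]; rw [if_neg (by decide), if_neg (by omega)]
    rw [zodiacScan]; rw [if_neg (by decide), if_neg (by omega)]
    rw [zodiacScan]; rw [if_neg (by decide), if_neg (by omega)]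
    rw [zodiacScan]; rw [if_neg (by decide), if_neg (by omega)]
    rw [zodiacScan]; rw [if_neg (by decide), if_neg (by omega)]
    rw [zodiacScan]; rw [if_pos (by decide), if_neg (by omega)]
    rw [zodiacScan]; rw [if_neg (by decide), if_neg (by omega)]
    rw [zodiacScan]; rw [if_neg (by decide), if_neg (by omega)]
    rw [zodiacScan]
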